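-- pv_equiv track=rewrite | github.com/ByteCrafterX/ByteAI | conversor.py | _integer_reduce_factor
-- ===== SOURCE A (Python) =====
-- def _integer_reduce_factor(w: int, h: int, target: int) -> int:
--     # fator inteiro 1,2,4,8... para reduzir antes de materializar
--     if target <= 0:
--         return 1
--     long_side = max(w, h)
--     f = 1
--     while (long_side // (f * 2)) >= target:
--         f *= 2
--     return max(1, f)
-- ===== SOURCE B (Python) =====
-- def _integer_reduce_factor(w: int, h: int, target: int) -> int:
--     # closed form: largest power of two p with max(w,h)//p >= target,
--     # i.e. the highest power of two not exceeding m = max(w,h)//target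
--     if target <= 0:
--         return 1
--     m = max(w, h) // target
--     if m < 1:
--         return 1
--     return 1 << (m.bit_length() - 1)
-- ===== Notes on version B (the rewrite author's own statement) =====
-- stated objective: simpler
-- what changed: Replaces the doubling while-loop with a closed form: m = max(w,h)//target, answer = largest power of two <= m via bit_length, using floor(long_side/p) >= target iff p <= m.
import Mathlib
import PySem

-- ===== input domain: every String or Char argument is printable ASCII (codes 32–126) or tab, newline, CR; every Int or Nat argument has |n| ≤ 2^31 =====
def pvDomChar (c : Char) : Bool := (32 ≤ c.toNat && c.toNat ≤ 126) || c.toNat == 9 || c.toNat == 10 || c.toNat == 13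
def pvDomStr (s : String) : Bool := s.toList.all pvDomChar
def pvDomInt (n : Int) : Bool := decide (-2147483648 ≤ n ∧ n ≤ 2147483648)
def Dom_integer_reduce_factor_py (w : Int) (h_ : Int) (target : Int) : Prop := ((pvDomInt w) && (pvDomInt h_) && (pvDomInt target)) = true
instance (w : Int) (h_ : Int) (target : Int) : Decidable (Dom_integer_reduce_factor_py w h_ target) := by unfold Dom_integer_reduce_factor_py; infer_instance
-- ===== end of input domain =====

-- B replaces A's doubling loop by a closed form: the answer is the largest power of
-- two not exceeding max(w,h)//target (objective: simpler).

-- ===== PORT A =====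
-- A's while-loop; the fuel only makes the recursion total: within Dom (|ints| ≤ 2^31)
-- the loop body runs fewer than 64 times, so fuel 64 never runs out on admitted inputs.
def pvAWhile (long_side target : Int) (f : Int) : Nat → Int
  | 0 => f
  | fuel + 1 =>
      if target ≤ PySem.Int.floordiv long_side (f * 2) then
        pvAWhile long_side target (f * 2) fuel
      else f

def integer_reduce_factor_py (w : Int) (h_ : Int) (target : Int) : Int :=
  if target ≤ 0 then 1
  else max 1 (pvAWhile (max w h_) target 1 64)

-- ===== PORT B =====
-- Python's '1 << (m.bit_length() - 1)' is '(1 : Int) <<< (PySem.Int.bitLength m - 1)'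
def integer_reduce_factor_py_alt (w : Int) (h_ : Int) (target : Int) : Int :=
  if target ≤ 0 then 1
  else
    let m := PySem.Int.floordiv (max w h_) target
    if m < 1 then 1
    else (1 : Int) <<< (PySem.Int.bitLength m - 1)

-- ===== PRECONDITION & SPEC =====
def Spec_integer_reduce_factor_py (w : Int) (h_ : Int) (target : Int) (out : Int) : Prop := out = integer_reduce_factor_py_alt w h_ target
instance (w : Int) (h_ : Int) (target : Int) (out : Int) : Decidable (Spec_integer_reduce_factor_py w h_ target out) := by unfold Spec_integer_reduce_factor_py; infer_instance

-- ===== CLAIM (what is proved, stated in full; the proofs are below) =====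
def Claim_equal_integer_reduce_factor_py : Prop := ∀ (w : Int) (h_ : Int) (target : Int), Dom_integer_reduce_factor_py w h_ target → Spec_integer_reduce_factor_py w h_ target (integer_reduce_factor_py w h_ target)

-- ===== LEMMAS AND PROOFS =====

-- the loop guard, read through floor division with positive divisors
theorem pv_cond_iff (ls t f : Int) (ht : 0 < t) (hf : 0 < f) :
    (t ≤ PySem.Int.floordiv ls (f * 2)) ↔ f * 2 ≤ PySem.Int.floordiv ls t := by
  rw [PySem.Int.le_floordiv_iff_mul_le (by positivity),
      PySem.Int.le_floordiv_iff_mul_le ht]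
  constructor <;> intro h <;> linarith

theorem pv_pow2_unique (x a b : Nat) (ha1 : 2 ^ a ≤ x) (ha2 : x < 2 ^ (a + 1))
    (hb1 : 2 ^ b ≤ x) (hb2 : x < 2 ^ (b + 1)) : a = b := by
  have h1 : a < b + 1 := (Nat.pow_lt_pow_iff_right (by norm_num)).1 (lt_of_le_of_lt ha1 hb2)
  have h2 : b < a + 1 := (Nat.pow_lt_pow_iff_right (by norm_num)).1 (lt_of_le_of_lt hb1 ha2)
  omega

-- bitLength m - 1 is the unique j with 2^j ≤ m < 2^(j+1)
theorem pv_bl_char (m : Int) (j : Nat) (h1 : (2:Int) ^ j ≤ m) (h2 : m < 2 ^ (j + 1)) :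
    PySem.Int.bitLength m - 1 = j := by
  have hmpos : 0 < m := lt_of_lt_of_le (by positivity) h1
  have habs : (m.natAbs : Int) = m := Int.natAbs_of_nonneg hmpos.le
  have hnat1 : 2 ^ j ≤ m.natAbs := by
    have : ((2:Int) ^ j) ≤ (m.natAbs : Int) := by rw [habs]; exact h1
    exact_mod_cast this
  have hnat2 : m.natAbs < 2 ^ (j + 1) := by
    have : (m.natAbs : Int) < (2:Int) ^ (j + 1) := by rw [habs]; exact h2
    exact_mod_cast this
  have hb1 := PySem.Int.two_pow_bitLength_le m (ne_of_gt hmpos)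
  have hb2 := PySem.Int.lt_two_pow_bitLength m
  have hblpos : 1 ≤ PySem.Int.bitLength m := by
    by_contra hc
    have h0 : PySem.Int.bitLength m = 0 := by omega
    rw [h0] at hb2
    have : 1 ≤ m.natAbs := le_trans (Nat.one_le_two_pow) hnat1
    omega
  have : PySem.Int.bitLength m - 1 + 1 = PySem.Int.bitLength m := by omega
  exact pv_pow2_unique m.natAbs _ j hb1 (by rw [this]; exact hb2) hnat1 hnat2

-- the loop, started at 2^k with 2^k ≤ m and enough fuel, ends at 2^(bitLength m - 1)
theorem pv_loop_eq (ls t : Int) (ht : 0 < t) :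
    ∀ (fuel k : Nat), (2:Int) ^ k ≤ PySem.Int.floordiv ls t →
      PySem.Int.floordiv ls t < 2 ^ (k + fuel + 1) →
      pvAWhile ls t ((2:Int) ^ k) fuel =
        (2:Int) ^ (PySem.Int.bitLength (PySem.Int.floordiv ls t) - 1) := by
  intro fuel
  induction fuel with
  | zero =>
      intro k h1 h2
      simp only [pvAWhile]
      rw [pv_bl_char _ k h1 (by simpa using h2)]
  | succ n ih =>
      intro k h1 h2
      have hfp : (0:Int) < 2 ^ k := by positivity
      have hiff := pv_cond_iff ls t (2 ^ k) ht hfp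
      simp only [pvAWhile]
      by_cases hc : t ≤ PySem.Int.floordiv ls (2 ^ k * 2)
      · rw [if_pos hc]
        have h2k : (2:Int) ^ k * 2 = 2 ^ (k + 1) := by ring
        rw [h2k]
        exact ih (k + 1) (by rw [← h2k]; exact hiff.1 hc)
          (by rw [show k + 1 + n + 1 = k + (n + 1) + 1 by ring]; exact h2)
      · rw [if_neg hc]
        have hnc : ¬ (2:Int) ^ k * 2 ≤ PySem.Int.floordiv ls t := fun h => hc (hiff.2 h)
        have hlt : PySem.Int.floordiv ls t < 2 ^ (k + 1) := by
          rw [pow_succ]; omega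
        rw [pv_bl_char _ k h1 hlt]

-- ===== VERDICT (by name: the statement is the Claim_ definition above) =====
theorem integer_reduce_factor_py_spec : Claim_equal_integer_reduce_factor_py := by
  intro w h_ target hdom
  unfold Spec_integer_reduce_factor_py integer_reduce_factor_py integer_reduce_factor_py_alt
  by_cases ht : target ≤ 0
  · simp [ht]
  · rw [if_neg ht, if_neg ht]
    have htpos : 0 < target := by omega
    set ls := max w h_ with hls
    set m := PySem.Int.floordiv ls target with hm
    by_cases hm1 : m < 1
    · -- guard fails immediately: 2 ≤ m is false
      rw [if_pos hm1]
      show max 1 (pvAWhile ls target 1 64) = 1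
      simp only [pvAWhile]
      have hcond : ¬ (target ≤ PySem.Int.floordiv ls (1 * 2)) := by
        rw [pv_cond_iff ls target 1 htpos one_pos, ← hm]
        omega
      rw [if_neg hcond]
      simp
    · rw [if_neg hm1]
      have hm1' : 1 ≤ m := by omega
      -- m ≤ ls ≤ 2^31, so fuel 64 is plenty
      have hlst : target ≤ ls := by
        have := (PySem.Int.le_floordiv_iff_mul_le (a := ls) (b := target) (q := 1) htpos).1 (by omega)
        linarith
      have hls0 : 0 ≤ ls := by omega
      have hmls : m ≤ ls := by
        rw [hm, PySem.Int.floordiv_eq_ediv_of_pos htpos]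
        exact Int.ediv_le_self target hls0
      have hlsB : ls ≤ 2147483648 := by
        have hw : pvDomInt w = true ∧ pvDomInt h_ = true ∧ pvDomInt target = true := by
          unfold Dom_integer_reduce_factor_py at hdom
          simp only [Bool.and_eq_true] at hdom
          exact ⟨hdom.1.1, hdom.1.2, hdom.2⟩
        have h1 := of_decide_eq_true hw.1
        have h2 := of_decide_eq_true hw.2.1
        rw [hls]
        omega
      have hbound : m < 2 ^ (0 + 64 + 1) := by
        calc m ≤ 2147483648 := le_trans hmls hlsB
        _ < 2 ^ (0 + 64 + 1) := by norm_num
      have := pv_loop_eq ls target htpos 64 0 (by simpa using hm1') hbound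
      rw [show ((2:Int) ^ 0) = 1 by norm_num] at this
      rw [this, Int.shiftLeft_eq, one_mul]
      exact max_eq_right (one_le_pow₀ (by norm_num))
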